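-- pv_equiv track=rewrite | github.com/totohoon02/BojHub | 프로그래머스/1/12917. 문자열 내림차순으로 배치하기/문자열 내림차순으로 배치하기.py | solution
-- ===== SOURCE A (Python) =====
-- def solution(s):
--     sm = []
--     bg = []
--     for c in s:
--         if c.islower():
--             sm.append(c)
--         else:
--             bg.append(c)
--     sm.sort(reverse=True)
--     bg.sort(reverse=True)
--
--     return "".join(sm) + "".join(bg)
-- ===== SOURCE B (Python) =====
-- def solution(s):
--     # one stable sort with a composite integer key: lowercase letters get an
--     # offset above every code point, so they come first under reverse=True
--     return "".join(sorted(s, key=lambda c: ord(c) + 0x110000 * c.islower(), reverse=True))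
-- ===== Notes on version B (the rewrite author's own statement) =====
-- stated objective: simpler
-- what changed: Replaced the partition-into-two-lists-then-sort-each loop with a single stable reverse sort of the whole string under a composite integer key (code point plus an above-all-code-points offset for lowercase letters).
import Mathlib
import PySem

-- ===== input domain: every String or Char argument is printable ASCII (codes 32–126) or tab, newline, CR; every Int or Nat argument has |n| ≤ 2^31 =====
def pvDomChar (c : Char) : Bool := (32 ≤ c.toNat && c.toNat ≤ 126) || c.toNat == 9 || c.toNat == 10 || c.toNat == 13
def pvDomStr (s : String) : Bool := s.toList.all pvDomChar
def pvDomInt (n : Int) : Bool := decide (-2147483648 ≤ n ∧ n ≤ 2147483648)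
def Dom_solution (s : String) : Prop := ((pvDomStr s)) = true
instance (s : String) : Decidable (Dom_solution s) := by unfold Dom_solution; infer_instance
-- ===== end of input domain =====

-- B replaces A's partition-into-two-lists-then-sort-each with ONE stable sort under a
-- composite integer key (lowercase offset above every code point), reverse=True; objective: simpler.

-- ===== PORT A =====
def solution (s : String) : String :=
  -- sm/bg built by the loop (append per char), each sorted reverse=True, then joined
  let p := s.toList.foldl
    (fun (acc : List Char × List Char) c =>
      if PySem.Chars.islower c then (acc.1 ++ [c], acc.2) else (acc.1, acc.2 ++ [c]))
    ([], [])
  String.ofList (PySem.List.sorted p.1 (fun c => c) true)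
    ++ String.ofList (PySem.List.sorted p.2 (fun c => c) true)

-- ===== PORT B =====
-- key = ord(c) + 0x110000 * c.islower()  (0x110000 = 1114112, above every code point)
def pyKey (c : Char) : Int := (c.toNat : Int) + 1114112 * (if PySem.Chars.islower c then 1 else 0)

def solution_alt (s : String) : String :=
  String.ofList (PySem.List.sorted s.toList pyKey true)

-- ===== PRECONDITION & SPEC =====
def Spec_solution (s : String) (out : String) : Prop := out = solution_alt s
instance (s : String) (out : String) : Decidable (Spec_solution s out) := by unfold Spec_solution; infer_instance

-- ===== CLAIM (what is proved, stated in full; the proofs are below) =====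
def Claim_equal_solution : Prop := ∀ (s : String), Dom_solution s → Spec_solution s (solution s)

-- ===== LEMMAS AND PROOFS =====

theorem char_toNat_lt (c : Char) : c.toNat < 1114112 := by
  have h := c.valid
  simp only [UInt32.isValidChar, Nat.isValidChar] at h
  simp only [Char.toNat]
  omega

theorem char_toNat_le_of_le {a b : Char} (h : b ≤ a) : b.toNat ≤ a.toNat := Fin.mk_le_mk.mp h

theorem pyKey_neg_inj : Function.Injective (fun c => -pyKey c) := by
  intro a b h
  simp only [neg_inj, pyKey] at h
  have ha := char_toNat_lt a
  have hb := char_toNat_lt b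
  have hn : a.toNat = b.toNat := by
    by_cases h1 : PySem.Chars.islower a <;> by_cases h2 : PySem.Chars.islower b <;>
      simp [h1, h2] at h <;> omega
  exact Char.ext (by simp only [Char.toNat] at hn; exact UInt32.toNat_inj.mp hn)

theorem partition_foldl (l : List Char) (a b : List Char) :
    l.foldl (fun (acc : List Char × List Char) c =>
      if PySem.Chars.islower c then (acc.1 ++ [c], acc.2) else (acc.1, acc.2 ++ [c])) (a, b)
    = (a ++ l.filter (fun c => PySem.Chars.islower c),
       b ++ l.filter (fun c => !PySem.Chars.islower c)) := by
  induction l generalizing a b with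
  | nil => simp
  | cons c t ih =>
    by_cases h : PySem.Chars.islower c <;> simp [h, ih]

theorem lists_eq (l : List Char) :
    PySem.List.sorted (l.filter (fun c => PySem.Chars.islower c)) (fun c => c) true
      ++ PySem.List.sorted (l.filter (fun c => !PySem.Chars.islower c)) (fun c => c) true
    = PySem.List.sorted l pyKey true := by
  apply PySem.List.eq_of_perm_of_pairwise_le_of_injective (fun c => -pyKey c) pyKey_neg_inj
  · refine ((List.Perm.append (PySem.List.sorted_perm _ _ _) (PySem.List.sorted_perm _ _ _)).trans
      (List.filter_append_perm _ l)).trans (PySem.List.sorted_perm l pyKey true).symm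
  · rw [List.pairwise_append]
    refine ⟨?_, ?_, ?_⟩
    · refine (PySem.List.sorted_pairwise_rev _ _).imp_of_mem ?_
      intro x y hx hy hle
      have hx' : PySem.Chars.islower x = true := by
        have := (PySem.List.mem_sorted _ _ _ _).mp hx; simp [List.mem_filter] at this; exact this.2
      have hy' : PySem.Chars.islower y = true := by
        have := (PySem.List.mem_sorted _ _ _ _).mp hy; simp [List.mem_filter] at this; exact this.2
      have hn := char_toNat_le_of_le hle
      simp [pyKey, hx', hy']
      omega
    · refine (PySem.List.sorted_pairwise_rev _ _).imp_of_mem ?_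
      intro x y hx hy hle
      have hx' : PySem.Chars.islower x = false := by
        have := (PySem.List.mem_sorted _ _ _ _).mp hx; simp [List.mem_filter] at this
        simpa using this.2
      have hy' : PySem.Chars.islower y = false := by
        have := (PySem.List.mem_sorted _ _ _ _).mp hy; simp [List.mem_filter] at this
        simpa using this.2
      have hn := char_toNat_le_of_le hle
      simp [pyKey, hx', hy']
      omega
    · intro x hx y hy
      have hx' : PySem.Chars.islower x = true := by
        have := (PySem.List.mem_sorted _ _ _ _).mp hx; simp [List.mem_filter] at this; exact this.2
      have hy' : PySem.Chars.islower y = false := by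
        have := (PySem.List.mem_sorted _ _ _ _).mp hy; simp [List.mem_filter] at this
        simpa using this.2
      have := char_toNat_lt y
      simp [pyKey, hx', hy']
      omega
  · refine (PySem.List.sorted_pairwise_rev l pyKey).imp ?_
    intro a b h
    simpa using h

theorem solution_eq_alt (s : String) : solution s = solution_alt s := by
  unfold solution solution_alt
  rw [partition_foldl]
  simp only [List.nil_append]
  rw [← String.ofList_append, lists_eq]

-- ===== VERDICT (by name: the statement is the Claim_ definition above) =====
theorem solution_spec : Claim_equal_solution := by
  intro s _
  exact solution_eq_alt s
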